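-- pv_equiv track=rewrite | github.com/mayank-k-jha/Line-Encoding | LineEncoding.py | Biphase_manchester
-- ===== SOURCE A (Python) =====
-- def Biphase_manchester(inp):
--     inp1=list(inp)
--     li,init=[],False
--     for i in range(len(inp1)):
--         if inp1[i]==0:
--             li.append(-1)
--             if not init:
--                 li.append(-1)
--                 init=True
--             li.append(1)
--         elif inp1[i]==1 :
--             li.append(1)
--             li.append(-1)
--     return li
-- ===== SOURCE B (Python) =====
-- def Biphase_manchester(inp):
--     xs = list(inp)
--     head, tail = xs, None
--     k = 0
--     for b in xs:
--         if b == 0: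
--             head, tail = xs[:k], xs[k + 1:]
--             break
--         k += 1
--     out = [v for b in head if b == 1 for v in (1, -1)]
--     if tail is not None:
--         out += [-1, -1, 1]
--         for b in tail:
--             if b == 0:
--                 out += [-1, 1]
--             elif b == 1:
--                 out += [1, -1]
--     return out
-- ===== Notes on version B (the rewrite author's own statement) =====
-- stated objective: alternative
-- what changed: B replaces A's stateful single pass (mutable init flag) by a split-at-first-zero decomposition: it locates the first zero, slices the input into head and tail, encodes the head with a stateless comprehension (one maps to high-low), emits the doubled-low start frame for the first zero, and encodes the tail with a uniform stateless rule.
import Mathlib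
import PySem

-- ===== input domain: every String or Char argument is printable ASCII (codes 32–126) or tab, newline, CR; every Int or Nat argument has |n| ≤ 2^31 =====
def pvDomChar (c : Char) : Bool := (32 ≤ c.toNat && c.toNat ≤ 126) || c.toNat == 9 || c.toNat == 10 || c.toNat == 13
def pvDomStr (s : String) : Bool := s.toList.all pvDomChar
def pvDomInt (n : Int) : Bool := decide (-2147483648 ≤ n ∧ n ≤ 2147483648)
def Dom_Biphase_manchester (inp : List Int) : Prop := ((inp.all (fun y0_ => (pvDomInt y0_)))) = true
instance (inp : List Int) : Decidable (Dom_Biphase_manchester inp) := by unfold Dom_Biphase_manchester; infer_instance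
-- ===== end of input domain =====

-- B replaces A's stateful flag pass by a split-at-first-zero decomposition with two stateless encoding passes (objective: alternative).

-- ===== PORT A =====
-- A's loop over indices with state (li, init), transcribed as a foldl over the elements with the same state.
def pvAStep (s : List Int × Bool) (x : Int) : List Int × Bool :=
  if x == 0 then
    let li := s.1 ++ [-1]
    if !s.2 then (li ++ [-1] ++ [1], true)
    else (li ++ [1], s.2)
  else if x == 1 then (s.1 ++ [1] ++ [-1], s.2)
  else s

def Biphase_manchester (inp : List Int) : List Int :=
  (inp.foldl pvAStep ([], false)).1

-- ===== PORT B =====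
-- B's first loop: scan for the first zero with counter k; on hit return the slices xs[:k], xs[k+1:]
def pvSplitLoop (xs : List Int) : List Int → Int → Option (List Int × List Int)
  | [], _ => none
  | b :: rest, k =>
      if b == 0 then some (PySem.List.slice xs none (some k), PySem.List.slice xs (some (k + 1)) none)
      else pvSplitLoop xs rest (k + 1)

-- B's tail loop body (0 -> [-1,1], 1 -> [1,-1], else skip)
def pvTailStep (out : List Int) (b : Int) : List Int :=
  if b == 0 then out ++ [-1, 1] else if b == 1 then out ++ [1, -1] else out

def Biphase_manchester_alt (inp : List Int) : List Int :=
  match pvSplitLoop inp inp 0 with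
  | none => inp.flatMap (fun b => if b == 1 then [1, -1] else [])
  | some (head, tail) =>
      tail.foldl pvTailStep
        (head.flatMap (fun b => if b == 1 then [1, -1] else []) ++ [-1, -1, 1])

-- ===== PRECONDITION & SPEC =====
def Spec_Biphase_manchester (inp : List Int) (out : List Int) : Prop := out = Biphase_manchester_alt inp
instance (inp : List Int) (out : List Int) : Decidable (Spec_Biphase_manchester inp out) := by unfold Spec_Biphase_manchester; infer_instance

-- ===== CLAIM (what is proved, stated in full; the proofs are below) =====
def Claim_equal_Biphase_manchester : Prop := ∀ (inp : List Int), Dom_Biphase_manchester inp → Spec_Biphase_manchester inp (Biphase_manchester inp)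

-- ===== LEMMAS AND PROOFS =====

-- reference encoding: enc t seen
def pvEnc : List Int → Bool → List Int
  | [], _ => []
  | x :: t, seen =>
      if x == 0 then
        (if seen then [-1, 1] else [-1, -1, 1]) ++ pvEnc t true
      else if x == 1 then [1, -1] ++ pvEnc t seen
      else pvEnc t seen

-- structural split at the first zero
def pvTSplit : List Int → Option (List Int × List Int)
  | [] => none
  | x :: t => if x = 0 then some ([], t) else (pvTSplit t).map (fun p => (x :: p.1, p.2))

lemma A_go (t : List Int) : ∀ (acc : List Int) (b : Bool),
    (t.foldl pvAStep (acc, b)).1 = acc ++ pvEnc t b := by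
  induction t with
  | nil => intro acc b; simp [pvEnc]
  | cons x t ih =>
    intro acc b
    rw [List.foldl_cons]
    by_cases h0 : x = 0
    · subst h0
      cases b
      · rw [show pvAStep (acc, false) 0 = (acc ++ [-1] ++ [-1] ++ [1], true) from rfl, ih]
        simp [pvEnc]
      · rw [show pvAStep (acc, true) 0 = (acc ++ [-1] ++ [1], true) from rfl, ih]
        simp [pvEnc]
    · by_cases h1 : x = 1
      · subst h1
        rw [show pvAStep (acc, b) 1 = (acc ++ [1] ++ [-1], b) from rfl, ih]
        simp [pvEnc]
      · have hstep : pvAStep (acc, b) x = (acc, b) := by simp [pvAStep, h0, h1]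
        rw [hstep, ih]
        simp [pvEnc, h0, h1]

lemma splitLoop_eq (t : List Int) : ∀ (pre : List Int),
    pvSplitLoop (pre ++ t) t (pre.length : Int)
      = (pvTSplit t).map (fun p => (pre ++ p.1, p.2)) := by
  induction t with
  | nil => intro pre; simp [pvSplitLoop, pvTSplit]
  | cons x t ih =>
    intro pre
    by_cases h0 : x = 0
    · subst h0
      simp only [pvSplitLoop, pvTSplit, if_pos rfl, beq_self_eq_true, if_true]
      rw [PySem.List.slice_to_natCast]
      have : ((pre.length : Int) + 1) = ((pre.length + 1 : Nat) : Int) := by push_cast; ring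
      rw [this, PySem.List.slice_from_natCast]
      simp [List.drop_append]
    · have h0' : (x == (0 : Int)) = false := by simpa using h0
      simp only [pvSplitLoop, pvTSplit, h0', if_neg h0, Bool.false_eq_true, if_false]
      have hlen : ((pre.length : Int) + 1) = (((pre ++ [x]).length : Nat) : Int) := by
        simp
      have hxs : pre ++ x :: t = (pre ++ [x]) ++ t := by simp
      rw [hlen, hxs, ih (pre ++ [x])]
      cases pvTSplit t with
      | none => rfl
      | some p => simp

lemma tail_go (t : List Int) : ∀ (acc : List Int),
    t.foldl pvTailStep acc = acc ++ pvEnc t true := by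
  induction t with
  | nil => intro acc; simp [pvEnc]
  | cons x t ih =>
    intro acc
    by_cases h0 : x = 0
    · simp [h0, pvEnc, pvTailStep, List.foldl_cons, ih]
    · by_cases h1 : x = 1
      · simp [h1, pvEnc, pvTailStep, List.foldl_cons, ih, h0]
      · simp [h1, pvEnc, pvTailStep, List.foldl_cons, ih, h0]

lemma enc_no_zero (t : List Int) (b : Bool) (h : pvTSplit t = none) :
    pvEnc t b = t.flatMap (fun x => if x == 1 then [1, -1] else []) := by
  induction t generalizing b with
  | nil => simp [pvEnc]
  | cons x t ih =>
    by_cases h0 : x = 0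
    · simp [pvTSplit, h0] at h
    · have h' : pvTSplit t = none := by
        simp only [pvTSplit, if_neg h0] at h
        exact Option.map_eq_none_iff.mp h
      by_cases h1 : x = 1
      · simp [pvEnc, h0, h1, ih _ h']
      · simp [pvEnc, h0, h1, ih _ h']

lemma enc_split (t : List Int) : ∀ (hd tl : List Int), pvTSplit t = some (hd, tl) →
    pvEnc t false = hd.flatMap (fun x => if x == 1 then [1, -1] else []) ++ [-1, -1, 1] ++ pvEnc tl true := by
  induction t with
  | nil => intro hd tl h; simp [pvTSplit] at h
  | cons x t ih =>
    intro hd tl h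
    by_cases h0 : x = 0
    · simp only [pvTSplit, if_pos h0, Option.some.injEq, Prod.mk.injEq] at h
      obtain ⟨h1, h2⟩ := h
      subst h1; subst h2; subst h0
      simp [pvEnc]
    · simp only [pvTSplit, if_neg h0] at h
      cases hp : pvTSplit t with
      | none => rw [hp] at h; simp at h
      | some p =>
        rw [hp] at h
        simp only [Option.map_some, Option.some.injEq, Prod.mk.injEq] at h
        obtain ⟨h1, h2⟩ := h
        subst h1; subst h2
        by_cases hx1 : x = 1
        · simp [pvEnc, h0, hx1, ih p.1 p.2 hp]
        · simp [pvEnc, h0, hx1, ih p.1 p.2 hp]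

-- ===== VERDICT (by name: the statement is the Claim_ definition above) =====
theorem Biphase_manchester_spec : Claim_equal_Biphase_manchester := by
  intro inp _
  unfold Spec_Biphase_manchester Biphase_manchester Biphase_manchester_alt
  rw [A_go]
  have hsplit := splitLoop_eq inp []
  simp only [List.nil_append, List.length_nil, Nat.cast_zero] at hsplit
  rw [hsplit]
  cases hp : pvTSplit inp with
  | none => simp [enc_no_zero inp false hp]
  | some p =>
    simp only [Option.map_some]
    rw [tail_go, enc_split inp p.1 p.2 hp]
    simp
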